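-- pv_equiv track=rewrite | github.com/ucm-cse-prg/team-genesis | form_teams.py | size_teams_with_labs
-- ===== SOURCE A (Python) =====
-- from typing import Optional, TypeAlias, Any
--
-- LabName: TypeAlias = str
--
-- TeamSizes: TypeAlias = list[int]
--
-- def size_teams_with_labs(
--     lab_populations: dict[LabName, int], base_team_size: int
-- ) -> dict[str, TeamSizes]:
--     """Assigns team sizes to labs given a base team size
--
--     Args:
--         lab_populations: A list of the populations of each lab.
--         base_team_size: The base size of each team.
--
--     Returns:
--         A dictionary mapping lab names to a list of team sizes.
--     """
--     lab_team_count = {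
--         lab: (population // base_team_size)
--         for lab, population in lab_populations.items()
--     }
--     lab_team_sizes: dict[str, TeamSizes] = {}
--     for lab, num_teams in lab_team_count.items():
--         lab_team_sizes[lab] = [base_team_size] * num_teams
--
--         remaining = lab_populations[lab] - num_teams * base_team_size
--         lab_team_sizes[lab] = [
--             lab_team_sizes[lab][j] + remaining // num_teams for j in range(num_teams)
--         ]
--         remaining = remaining % num_teams
--         for j in range(remaining):
--             lab_team_sizes[lab][j] += 1
--
--         for j, size in enumerate(lab_team_sizes[lab]):
--             if size > 6:
--                 lab_team_sizes[lab][j] = size // 2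
--                 lab_team_sizes[lab].append(size // 2 + size % 2)
--
--     return lab_team_sizes
-- ===== SOURCE B (Python) =====
-- def size_teams_with_labs(lab_populations, base_team_size):
--     """Per-index closed-form team size plus generation-wise oversize splitting."""
--     lab_team_sizes = {}
--     for lab, population in lab_populations.items():
--         num_teams = population // base_team_size
--         # closed form: team i gets ceil of the remaining average, i.e. (p - i + n - 1) // n
--         gen = [(population - i + num_teams - 1) // num_teams for i in range(num_teams)]
--         out = []
--         while gen:
--             out.extend(s // 2 if s > 6 else s for s in gen)
--             gen = [(s + 1) // 2 for s in gen if s > 6]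
--         lab_team_sizes[lab] = out
--     return lab_team_sizes
-- ===== Notes on version B (the rewrite author's own statement) =====
-- stated objective: alternative
-- what changed: Each team size is computed directly by the closed-form per-index formula (population - i + num_teams - 1) // num_teams instead of A's staged base-list/add-quotient/increment passes, and oversized teams are split generation by generation with pure comprehensions (output of one wave, children into the next) instead of A's in-place replace-and-append scan of the growing list.
import Mathlib
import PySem

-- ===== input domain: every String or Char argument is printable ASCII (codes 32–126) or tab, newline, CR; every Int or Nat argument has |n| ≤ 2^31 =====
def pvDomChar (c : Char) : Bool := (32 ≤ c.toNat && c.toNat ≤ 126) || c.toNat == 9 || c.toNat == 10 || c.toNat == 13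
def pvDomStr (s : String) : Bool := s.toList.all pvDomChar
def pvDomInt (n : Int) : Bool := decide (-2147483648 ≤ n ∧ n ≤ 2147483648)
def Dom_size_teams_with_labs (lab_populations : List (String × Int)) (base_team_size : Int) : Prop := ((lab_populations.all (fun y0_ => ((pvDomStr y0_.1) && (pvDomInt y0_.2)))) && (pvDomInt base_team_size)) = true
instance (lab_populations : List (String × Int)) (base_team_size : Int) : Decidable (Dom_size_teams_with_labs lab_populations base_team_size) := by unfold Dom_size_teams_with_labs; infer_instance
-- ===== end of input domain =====

-- B computes each team size by a per-index closed form and splits oversized teams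
-- generation by generation with pure comprehensions, instead of A's staged list passes
-- and in-place replace-and-append scan (objective: alternative; same asymptotic cost).

-- ===== PORT A =====
-- totality device for A's scan: fuel; each visited index consumes 1 fuel, and
-- sum-of-positive-entries + length + 1 dominates the number of visited indices
def pvFuel (sizes : List Int) : Nat :=
  sizes.foldl (fun a v => a + v.toNat) 0 + sizes.length + 1

-- A's `for j, size in enumerate(lab_team_sizes[lab])` over the list it is mutating:
-- Python's list iterator is positional and sees appended elements; `done` holds the
-- already-visited prefix (splits written back in place), `todo` the rest
def pvSplitA (fuel : Nat) (done todo : List Int) : List Int :=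
  match fuel, todo with
  | 0, _ => done ++ todo
  | _ + 1, [] => done
  | f + 1, s :: rest =>
      if s > 6 then
        pvSplitA f (done ++ [PySem.Int.floordiv s 2])
          (rest ++ [PySem.Int.floordiv s 2 + PySem.Int.mod s 2])
      else
        pvSplitA f (done ++ [s]) rest

-- the body of A's per-lab loop: pop = lab_populations[lab], n = lab_team_count[lab]
def pvLabSizesA (pop n base : Int) : List Int :=
  let sizes0 := List.replicate n.toNat base
  let remaining := pop - n * base
  let sizes1 := (PySem.List.pyRange 0 n 1).map
      (fun j => PySem.List.pyGetD sizes0 j 0 + PySem.Int.floordiv remaining n)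
  let rem2 := PySem.Int.mod remaining n
  let sizes2 := (PySem.List.pyRange 0 rem2 1).foldl
      (fun acc j => PySem.List.pySetD acc j (PySem.List.pyGetD acc j 0 + 1)) sizes1
  pvSplitA (pvFuel sizes2) [] sizes2

def size_teams_with_labs (lab_populations : List (String × Int)) (base_team_size : Int) : List (String × List Int) :=
  let d := PySem.Dict.ofList lab_populations
  let lab_team_count : PySem.Dict String Int :=
    d.items.foldl (fun acc p => acc.insert p.1 (PySem.Int.floordiv p.2 base_team_size)) PySem.Dict.empty
  let lab_team_sizes : PySem.Dict String (List Int) :=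
    lab_team_count.items.foldl
      (fun acc p => acc.insert p.1 (pvLabSizesA (d.getD p.1 0) p.2 base_team_size))
      PySem.Dict.empty
  lab_team_sizes.items

-- ===== PORT B =====
-- totality device for B's `while gen:` loop: fuel = sum-of-positive-entries + length + 1,
-- which strictly dominates the number of generations
def pvMeasure (l : List Int) : Nat := (l.map Int.toNat).sum + l.length

-- B's generation loop: emit this wave's (possibly halved) sizes, recurse on the children
def pvSplitGens (fuel : Nat) (gen : List Int) : List Int :=
  match fuel with
  | 0 => []
  | f + 1 =>
      if gen.isEmpty then []
      else
        gen.map (fun s => if s > 6 then PySem.Int.floordiv s 2 else s)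
          ++ pvSplitGens f
              (gen.filterMap (fun s => if s > 6 then some (PySem.Int.floordiv (s + 1) 2) else none))

-- B's per-lab body: closed-form sizes, then the generation loop
def pvLabSizesB (pop base : Int) : List Int :=
  let n := PySem.Int.floordiv pop base
  let gen0 := (PySem.List.pyRange 0 n 1).map
      (fun i => PySem.Int.floordiv (pop - i + n - 1) n)
  pvSplitGens (pvMeasure gen0 + 1) gen0

def size_teams_with_labs_alt (lab_populations : List (String × Int)) (base_team_size : Int) : List (String × List Int) :=
  let d := PySem.Dict.ofList lab_populations
  (d.items.foldl (fun acc p => acc.insert p.1 (pvLabSizesB p.2 base_team_size)) (PySem.Dict.empty : PySem.Dict String (List Int))).items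

-- ===== PRECONDITION & SPEC =====
-- Pre_ excludes exactly the inputs where A raises ZeroDivisionError: some lab whose
-- population // base_team_size is 0 (this covers base_team_size = 0 with a nonempty dict,
-- since floordiv _ 0 = 0 here).
def Pre_size_teams_with_labs (lab_populations : List (String × Int)) (base_team_size : Int) : Prop :=
  ∀ p ∈ (PySem.Dict.ofList lab_populations).items, PySem.Int.floordiv p.2 base_team_size ≠ 0
instance (lab_populations : List (String × Int)) (base_team_size : Int) : Decidable (Pre_size_teams_with_labs lab_populations base_team_size) := by unfold Pre_size_teams_with_labs; infer_instance

def pvWitness_size_teams_with_labs : (List (String × Int)) × Int := ([("cse", 17), ("bio", 5)], 4)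

def Spec_size_teams_with_labs (lab_populations : List (String × Int)) (base_team_size : Int) (out : List (String × List Int)) : Prop := out = size_teams_with_labs_alt lab_populations base_team_size
instance (lab_populations : List (String × Int)) (base_team_size : Int) (out : List (String × List Int)) : Decidable (Spec_size_teams_with_labs lab_populations base_team_size out) := by unfold Spec_size_teams_with_labs; infer_instance

-- ===== CLAIM (what is proved, stated in full; the proofs are below) =====
def Claim_equal_size_teams_with_labs : Prop := ∀ (lab_populations : List (String × Int)) (base_team_size : Int), Dom_size_teams_with_labs lab_populations base_team_size → Pre_size_teams_with_labs lab_populations base_team_size → Spec_size_teams_with_labs lab_populations base_team_size (size_teams_with_labs lab_populations base_team_size)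
-- ===== LEMMAS AND PROOFS =====

-- the common FIFO semantics both split phases realise: pop the head, emit its
-- (possibly halved) value, enqueue its child at the back
def pyQueue : List Int → List Int
  | [] => []
  | s :: rest =>
      if h : s > 6 then
        PySem.Int.floordiv s 2 :: pyQueue (rest ++ [PySem.Int.floordiv (s + 1) 2])
      else s :: pyQueue rest
  termination_by l => pvMeasure l
  decreasing_by
  · have h2 : PySem.Int.floordiv (s + 1) 2 = (s + 1) / 2 :=
      PySem.Int.floordiv_eq_ediv_of_pos (by norm_num)
    simp [pvMeasure, List.map_append, List.sum_append]
    omega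
  · simp [pvMeasure]
    omega

lemma pyQueue_cons (s : Int) (rest : List Int) :
    pyQueue (s :: rest)
      = if s > 6 then
          PySem.Int.floordiv s 2 :: pyQueue (rest ++ [PySem.Int.floordiv (s + 1) 2])
        else s :: pyQueue rest := by
  rw [pyQueue]; split <;> simp_all

lemma pvSplitA_eq_pyQueue (fuel : Nat) : ∀ (done todo : List Int),
    pvMeasure todo + 1 ≤ fuel → pvSplitA fuel done todo = done ++ pyQueue todo := by
  induction fuel with
  | zero => intro done todo h; omega -- (unreachable)
  | succ f ih =>
    intro done todo h
    cases todo with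
    | nil => simp [pvSplitA, pyQueue]
    | cons s rest =>
      rw [pvSplitA, pyQueue_cons]
      by_cases hs : s > 6
      · rw [if_pos hs, if_pos hs]
        have hdm : PySem.Int.floordiv s 2 + PySem.Int.mod s 2 = PySem.Int.floordiv (s + 1) 2 := by
          rw [PySem.Int.floordiv_eq_ediv_of_pos (by norm_num : (0:Int) < 2),
              PySem.Int.floordiv_eq_ediv_of_pos (by norm_num : (0:Int) < 2),
              PySem.Int.mod_eq_emod_of_pos (by norm_num : (0:Int) < 2)]
          omega
        have h2 : PySem.Int.floordiv (s + 1) 2 = (s + 1) / 2 :=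
          PySem.Int.floordiv_eq_ediv_of_pos (by norm_num)
        rw [hdm, ih (done ++ [PySem.Int.floordiv s 2]) (rest ++ [PySem.Int.floordiv (s + 1) 2])
          (by simp [pvMeasure, List.map_append, List.sum_append] at h ⊢; omega)]
        simp
      · rw [if_neg hs, if_neg hs,
          ih (done ++ [s]) rest (by simp [pvMeasure] at h ⊢; omega)]
        simp

lemma pyQueue_append : ∀ (gen acc : List Int),
    pyQueue (gen ++ acc)
      = gen.map (fun s => if s > 6 then PySem.Int.floordiv s 2 else s)
        ++ pyQueue (acc ++ gen.filterMap
            (fun s => if s > 6 then some (PySem.Int.floordiv (s + 1) 2) else none)) := by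
  intro gen
  induction gen with
  | nil => intro acc; simp
  | cons s g ih =>
    intro acc
    rw [List.cons_append, pyQueue_cons]
    by_cases hs : s > 6
    · rw [if_pos hs]
      have h1 : g ++ acc ++ [PySem.Int.floordiv (s + 1) 2]
          = g ++ (acc ++ [PySem.Int.floordiv (s + 1) 2]) := by simp
      rw [h1, ih (acc ++ [PySem.Int.floordiv (s + 1) 2])]
      simp [hs]
    · rw [if_neg hs, ih acc]
      simp [hs]

lemma pvChildren_measure : ∀ gen : List Int,
    pvMeasure (gen.filterMap (fun s => if s > 6 then some (PySem.Int.floordiv (s + 1) 2) else none))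
      ≤ (gen.map Int.toNat).sum := by
  intro gen
  induction gen with
  | nil => simp [pvMeasure]
  | cons s g ih =>
    by_cases hs : s > 6
    · have h2 : PySem.Int.floordiv (s + 1) 2 = (s + 1) / 2 :=
        PySem.Int.floordiv_eq_ediv_of_pos (by norm_num)
      simp only [List.filterMap_cons, if_pos hs, List.map_cons, List.sum_cons]
      simp [pvMeasure] at ih ⊢
      omega
    · simp only [List.filterMap_cons, if_neg hs, List.map_cons, List.sum_cons]
      omega

lemma pvSplitGens_eq_pyQueue (fuel : Nat) : ∀ gen : List Int,
    pvMeasure gen + 1 ≤ fuel → pvSplitGens fuel gen = pyQueue gen := by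
  induction fuel with
  | zero => intro gen h; omega
  | succ f ih =>
    intro gen h
    rw [pvSplitGens]
    cases gen with
    | nil => simp [pyQueue]
    | cons s g =>
      rw [if_neg (by simp)]
      have hq := pyQueue_append (s :: g) []
      simp only [List.append_nil, List.nil_append] at hq
      rw [hq, ih _ ?_]
      have hcm := pvChildren_measure (s :: g)
      simp only [List.map_cons, List.sum_cons] at hcm
      simp only [pvMeasure, List.map_cons, List.sum_cons, List.length_cons] at h
      omega

lemma pvFoldl_toNat (l : List Int) : ∀ a : Nat,
    l.foldl (fun a v => a + v.toNat) a = a + (l.map Int.toNat).sum := by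
  induction l with
  | nil => simp
  | cons x xs ih => intro a; simp only [List.foldl_cons, List.map_cons, List.sum_cons, ih]; omega

lemma pvFuel_eq (l : List Int) : pvFuel l = pvMeasure l + 1 := by
  unfold pvFuel pvMeasure
  rw [pvFoldl_toNat]
  omega

-- B's closed-form list equals the balanced replicate form (n > 0)
lemma pvBalanced (pop n : Int) (hpos : 0 < n) :
    (PySem.List.pyRange 0 n 1).map (fun i => PySem.Int.floordiv (pop - i + n - 1) n)
      = List.replicate (PySem.Int.mod pop n).toNat (PySem.Int.floordiv pop n + 1)
        ++ List.replicate (n - PySem.Int.mod pop n).toNat (PySem.Int.floordiv pop n) := by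
  have hq : PySem.Int.floordiv pop n = pop / n := PySem.Int.floordiv_eq_ediv_of_pos hpos
  have hrm : PySem.Int.mod pop n = pop % n := PySem.Int.mod_eq_emod_of_pos hpos
  have hr0 : 0 ≤ pop % n := Int.emod_nonneg pop (by omega)
  have hrn : pop % n < n := Int.emod_lt_of_pos pop hpos
  have hdm : n * (pop / n) + pop % n = pop := Int.ediv_add_emod pop n
  rw [hq, hrm]
  apply List.ext_getElem
  · simp [PySem.List.length_pyRange_one]
    omega
  · intro i h1 h2
    have hin : i < n.toNat := by
      simpa [PySem.List.length_pyRange_one] using h1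
    rw [List.getElem_map, PySem.List.getElem_pyRange_one]
    have hfd : PySem.Int.floordiv (pop - (0 + (i : Int)) + n - 1) n
        = (pop - (i : Int) + n - 1) / n := by
      rw [PySem.Int.floordiv_eq_ediv_of_pos hpos]; ring_nf
    rw [hfd]
    by_cases hi : i < (pop % n).toNat
    · rw [List.getElem_append_left (by simpa using hi), List.getElem_replicate]
      have hdm' : n * (pop / n + 1) = n * (pop / n) + n := by ring
      have heq : pop - (i : Int) + n - 1 = (pop % n - i - 1) + n * (pop / n + 1) := by omega
      rw [heq, Int.add_mul_ediv_left _ _ (by omega : n ≠ 0),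
        Int.ediv_eq_zero_of_lt (by omega) (by omega)]
      omega
    · rw [List.getElem_append_right (by simpa using hi), List.getElem_replicate]
      have heq : pop - (i : Int) + n - 1 = (pop % n - i + n - 1) + n * (pop / n) := by omega
      rw [heq, Int.add_mul_ediv_left _ _ (by omega : n ≠ 0),
        Int.ediv_eq_zero_of_lt (by omega) (by omega)]
      omega

lemma pvIncrLoop (q : Int) (m k : Nat) (hk : k ≤ m) :
    (PySem.List.pyRange 0 (k : Int) 1).foldl
      (fun acc j => PySem.List.pySetD acc j (PySem.List.pyGetD acc j 0 + 1))
      (List.replicate m q)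
    = List.replicate k (q + 1) ++ List.replicate (m - k) q := by
  induction k with
  | zero => simp [PySem.List.pyRange_one_eq_nil]
  | succ k ih =>
    have hk' : k ≤ m := by omega
    have hrange : PySem.List.pyRange 0 ((k : Int) + 1) 1
        = PySem.List.pyRange 0 (k : Int) 1 ++ [(k : Int)] :=
      PySem.List.pyRange_one_succ_right (by positivity)
    have hcast : ((k + 1 : Nat) : Int) = (k : Int) + 1 := by push_cast; ring
    rw [hcast, hrange, List.foldl_append, ih hk']
    obtain ⟨j, hj⟩ : ∃ j, m - k = j + 1 := ⟨m - k - 1, by omega⟩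
    have hj' : m - (k + 1) = j := by omega
    rw [hj, hj', List.replicate_succ]
    have hget : PySem.List.pyGetD (List.replicate k (q + 1) ++ q :: List.replicate j q) (k : Int) 0 = q := by
      rw [PySem.List.pyGetD_natCast, List.getD, List.getElem?_append_right (by simp)]
      simp
    have hset : PySem.List.pySetD (List.replicate k (q + 1) ++ q :: List.replicate j q) (k : Int) (q + 1)
        = List.replicate (k + 1) (q + 1) ++ List.replicate j q := by
      rw [PySem.List.pySetD_natCast, List.set_append, List.replicate_succ' (n := k)]
      simp
    simp only [List.foldl_cons, List.foldl_nil, hget, hset]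

lemma pvLab_eq (pop base : Int) (hn : PySem.Int.floordiv pop base ≠ 0) :
    pvLabSizesA pop (PySem.Int.floordiv pop base) base = pvLabSizesB pop base := by
  unfold pvLabSizesA pvLabSizesB
  dsimp only
  generalize hN : PySem.Int.floordiv pop base = n at hn ⊢
  rcases lt_or_gt_of_ne hn with hneg | hpos
  · -- n < 0 : both lists are empty
    have h1 : PySem.List.pyRange 0 n 1 = [] := PySem.List.pyRange_one_eq_nil (by omega)
    have h2 : PySem.Int.mod (pop - n * base) n ≤ 0 := (PySem.Int.mod_neg_bounds _ hneg).2
    have h3 : PySem.List.pyRange 0 (PySem.Int.mod (pop - n * base) n) 1 = [] :=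
      PySem.List.pyRange_one_eq_nil (by omega)
    simp [h1, h3, pvFuel, pvMeasure, pvSplitA, pvSplitGens]
  · -- n > 0 : both sides equal pyQueue of the balanced list
    have hq : PySem.Int.floordiv pop n = base + PySem.Int.floordiv (pop - n * base) n := by
      rw [PySem.Int.floordiv_eq_ediv_of_pos hpos, PySem.Int.floordiv_eq_ediv_of_pos hpos]
      have hpop : pop = (pop - n * base) + base * n := by ring
      conv_lhs => rw [hpop]
      rw [Int.add_mul_ediv_right _ _ (by omega : n ≠ 0)]
      ring
    have hr : PySem.Int.mod pop n = PySem.Int.mod (pop - n * base) n := by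
      rw [PySem.Int.mod_eq_emod_of_pos hpos, PySem.Int.mod_eq_emod_of_pos hpos]
      have hpop : pop = (pop - n * base) + n * base := by ring
      conv_lhs => rw [hpop]
      rw [Int.add_mul_emod_self_left]
    have hr0 : 0 ≤ PySem.Int.mod pop n := PySem.Int.mod_nonneg pop hpos
    have hrn : PySem.Int.mod pop n < n := PySem.Int.mod_lt pop hpos
    have hsizes1 : (PySem.List.pyRange 0 n 1).map
        (fun j => PySem.List.pyGetD (List.replicate n.toNat base) j 0
          + PySem.Int.floordiv (pop - n * base) n)
        = List.replicate n.toNat (PySem.Int.floordiv pop n) := by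
      rw [List.eq_replicate_iff]
      refine ⟨by simp [PySem.List.length_pyRange_one], ?_⟩
      intro b hb
      obtain ⟨j, hj, rfl⟩ := List.mem_map.mp hb
      have hj' := PySem.List.mem_pyRange_one.mp hj
      have hget : PySem.List.pyGetD (List.replicate n.toNat base) j 0 = base := by
        rw [PySem.List.pyGetD_eq_getElem _ _ hj'.1 (by simp; omega)]
        simp
      rw [hget, hq]
    rw [hsizes1]
    have hcast : (((PySem.Int.mod pop n).toNat : Nat) : Int) = PySem.Int.mod pop n := by omega
    have hloop := pvIncrLoop (PySem.Int.floordiv pop n) n.toNat (PySem.Int.mod pop n).toNat (by omega)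
    rw [hcast, hr] at hloop
    rw [hloop, ← hr]
    have hnr : (n - PySem.Int.mod pop n).toNat = n.toNat - (PySem.Int.mod pop n).toNat := by omega
    rw [pvBalanced pop n hpos, hnr]
    rw [pvFuel_eq, pvSplitA_eq_pyQueue _ _ _ (le_refl _),
      pvSplitGens_eq_pyQueue _ _ (le_refl _)]
    simp

lemma pvMain (lp : List (String × Int)) (base : Int)
    (hall : ∀ p ∈ (PySem.Dict.ofList lp).items, PySem.Int.floordiv p.2 base ≠ 0) :
    size_teams_with_labs lp base = size_teams_with_labs_alt lp base := by
  simp only [size_teams_with_labs, size_teams_with_labs_alt]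
  have hnodup : ((PySem.Dict.ofList lp).items.map Prod.fst).Nodup := by
    have := PySem.Dict.nodup_keys_ofList (ps := lp)
    simpa [PySem.Dict.keys] using this
  have h1 : ((PySem.Dict.ofList lp).items.foldl
      (fun acc p => acc.insert p.1 (PySem.Int.floordiv p.2 base)) (PySem.Dict.empty : PySem.Dict String Int)).items
      = (PySem.Dict.ofList lp).items.map (fun p => (p.1, PySem.Int.floordiv p.2 base)) := by
    rw [show (fun (acc : PySem.Dict String Int) (p : String × Int) => acc.insert p.1 (PySem.Int.floordiv p.2 base))
          = fun acc p => acc.insert (Prod.fst p) ((fun q : String × Int => PySem.Int.floordiv q.2 base) p) from rfl,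
        PySem.Dict.items_foldl_insert_fresh _ Prod.fst _ _ (fun a _ => PySem.Dict.contains_empty _) hnodup]
    simp
    rfl
  rw [h1]
  have hnodup2 : (((PySem.Dict.ofList lp).items.map (fun p => (p.1, PySem.Int.floordiv p.2 base))).map Prod.fst).Nodup := by
    rw [List.map_map]
    simpa using hnodup
  have h2 : (((PySem.Dict.ofList lp).items.map (fun p => (p.1, PySem.Int.floordiv p.2 base))).foldl
      (fun acc p => acc.insert p.1 (pvLabSizesA ((PySem.Dict.ofList lp).getD p.1 0) p.2 base)) (PySem.Dict.empty : PySem.Dict String (List Int))).items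
      = ((PySem.Dict.ofList lp).items.map (fun p => (p.1, PySem.Int.floordiv p.2 base))).map
          (fun p => (p.1, pvLabSizesA ((PySem.Dict.ofList lp).getD p.1 0) p.2 base)) := by
    rw [show (fun (acc : PySem.Dict String (List Int)) (p : String × Int) => acc.insert p.1 (pvLabSizesA ((PySem.Dict.ofList lp).getD p.1 0) p.2 base))
          = fun acc p => acc.insert (Prod.fst p) ((fun q : String × Int => pvLabSizesA ((PySem.Dict.ofList lp).getD q.1 0) q.2 base) p) from rfl,
        PySem.Dict.items_foldl_insert_fresh _ Prod.fst _ _ (fun a _ => PySem.Dict.contains_empty _) hnodup2]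
    simp
    rfl
  rw [h2]
  have h3 : ((PySem.Dict.ofList lp).items.foldl
      (fun acc p => acc.insert p.1 (pvLabSizesB p.2 base)) (PySem.Dict.empty : PySem.Dict String (List Int))).items
      = (PySem.Dict.ofList lp).items.map (fun p => (p.1, pvLabSizesB p.2 base)) := by
    rw [show (fun (acc : PySem.Dict String (List Int)) (p : String × Int) => acc.insert p.1 (pvLabSizesB p.2 base))
          = fun acc p => acc.insert (Prod.fst p) ((fun q : String × Int => pvLabSizesB q.2 base) p) from rfl,
        PySem.Dict.items_foldl_insert_fresh _ Prod.fst _ _ (fun a _ => PySem.Dict.contains_empty _) hnodup]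
    simp
    rfl
  rw [h3, List.map_map]
  refine List.map_congr_left ?_
  intro p hp
  have hgetD : (PySem.Dict.ofList lp).getD p.1 0 = p.2 := by
    exact PySem.Dict.getD_of_mem_items _ (by simpa using hp) (PySem.Dict.nodup_keys_ofList lp) 0
  simp only [Function.comp]
  rw [hgetD]
  exact congrArg (Prod.mk p.1) (pvLab_eq p.2 base (hall p hp))

-- ===== VERDICT (by name: the statement is the Claim_ definition above) =====
theorem size_teams_with_labs_spec : Claim_equal_size_teams_with_labs := by
  intro lab_populations base_team_size _hdom hpre
  unfold Spec_size_teams_with_labs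
  exact pvMain lab_populations base_team_size hpre
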